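-- pv_equiv track=rewrite | github.com/namel3ss-Ai/namel3ss | tests/contract/test_lifecycle_conventions.py | _extract_lifecycle_values
-- ===== SOURCE A (Python) =====
-- def _extract_lifecycle_values(text: str) -> list[str]:
--     lines = text.splitlines()
--     try:
--         start = lines.index("Canonical values:")
--     except ValueError:
--         return []
--     values: list[str] = []
--     for line in lines[start + 1 :]:
--         if not line.strip():
--             break
--         if line.strip().startswith("Example:"):
--             break
--         if not line.strip().startswith("-"):
--             continue
--         raw = line.strip().lstrip("- ").strip()
--         if raw.startswith('"') and raw.endswith('"'):
--             raw = raw[1:-1]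
--         values.append(raw)
--     return values
-- ===== SOURCE B (Python) =====
-- from functools import reduce
--
-- SEEK, COLLECT, DONE = 0, 1, 2
--
-- def _step(state, line):
--     mode, acc = state
--     if mode == SEEK:
--         return (COLLECT, acc) if line == "Canonical values:" else state
--     if mode == COLLECT:
--         s = line.strip()
--         if not s or s.startswith("Example:"):
--             return (DONE, acc)
--         if s.startswith("-"):
--             raw = s.lstrip("- ").strip()
--             if raw.startswith('"') and raw.endswith('"'):
--                 raw = raw[1:-1]
--             return (COLLECT, acc + [raw])
--         return state
--     return state
--
-- def _extract_lifecycle_values(text: str) -> list[str]: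
--     # single fold over all lines with an explicit parser state (seek/collect/done);
--     # no index lookup, no slicing, no break/continue
--     return reduce(_step, text.splitlines(), (SEEK, []))[1]
-- ===== Notes on version B (the rewrite author's own statement) =====
-- stated objective: alternative
-- what changed: Replaces A's marker lookup (try/except .index), list slice and break/continue accumulator loop with a single functools.reduce fold over all lines driven by an explicit three-state parser (seek/collect/done); no index, no slice, no break.
import Mathlib
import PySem

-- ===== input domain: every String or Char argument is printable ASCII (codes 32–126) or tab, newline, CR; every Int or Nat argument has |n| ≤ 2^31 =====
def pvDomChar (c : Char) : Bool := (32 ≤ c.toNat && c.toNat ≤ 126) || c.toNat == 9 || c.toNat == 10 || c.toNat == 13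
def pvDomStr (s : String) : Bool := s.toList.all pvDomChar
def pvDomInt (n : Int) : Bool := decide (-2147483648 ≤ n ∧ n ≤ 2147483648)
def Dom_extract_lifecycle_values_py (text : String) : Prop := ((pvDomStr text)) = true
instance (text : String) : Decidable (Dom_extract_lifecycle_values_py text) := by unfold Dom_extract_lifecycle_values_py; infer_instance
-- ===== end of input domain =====

-- B replaces A's index-lookup + slice + break/continue loop with a single fold over all
-- lines driven by an explicit three-state parser (seek/collect/done); same cost (alternative).

-- ===== PORT A =====
-- line.strip().lstrip("- ").strip(): lstrip("- ") drops leading '-' and ' ' characters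
-- (exact, ported by hand; PySem has no lstrip-with-charset — shared by both ports as a leaf primitive)
def pvLstripDashA (s : String) : String :=
  String.ofList (s.toList.dropWhile (fun c => c == '-' || c == ' '))

def pvLoopA : List String → List String
  | [] => []
  | line :: rest =>
    if PySem.Str.strip line = "" then []
    else if PySem.Str.startswith (PySem.Str.strip line) "Example:" then []
    else if ¬ (PySem.Str.startswith (PySem.Str.strip line) "-" = true) then pvLoopA rest
    else
      let raw := PySem.Str.strip (pvLstripDashA (PySem.Str.strip line))
      let raw :=
        if PySem.Str.startswith raw "\"" = true ∧ PySem.Str.endswith raw "\"" = true then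
          PySem.Str.slice raw (some 1) (some (-1))
        else raw
      raw :: pvLoopA rest

def extract_lifecycle_values_py (text : String) : List String :=
  let lines := PySem.Str.splitlines text
  match PySem.List.index? lines "Canonical values:" with
  | none => []
  | some start => pvLoopA (lines.drop (start + 1))   -- lines[start+1:] with start+1 ≥ 0

-- ===== PORT B =====
def pvDequoteB (raw : String) : String :=
  if PySem.Str.startswith raw "\"" = true ∧ PySem.Str.endswith raw "\"" = true then
    PySem.Str.slice raw (some 1) (some (-1))
  else raw

-- parser state: 0 = SEEK, 1 = COLLECT, 2 = DONE, with the accumulated values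
def pvStepB (st : Nat × List String) (line : String) : Nat × List String :=
  if st.1 = 0 then
    if line = "Canonical values:" then (1, st.2) else st
  else if st.1 = 1 then
    let s := PySem.Str.strip line
    if s = "" ∨ PySem.Str.startswith s "Example:" = true then (2, st.2)
    else if PySem.Str.startswith s "-" = true then
      (1, st.2 ++ [pvDequoteB (PySem.Str.strip (pvLstripDashA s))])
    else st
  else st

def extract_lifecycle_values_py_alt (text : String) : List String :=
  ((PySem.Str.splitlines text).foldl pvStepB (0, [])).2

-- ===== PRECONDITION & SPEC =====
def Spec_extract_lifecycle_values_py (text : String) (out : List String) : Prop := out = extract_lifecycle_values_py_alt text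
instance (text : String) (out : List String) : Decidable (Spec_extract_lifecycle_values_py text out) := by unfold Spec_extract_lifecycle_values_py; infer_instance

-- ===== CLAIM (what is proved, stated in full; the proofs are below) =====
def Claim_equal_extract_lifecycle_values_py : Prop := ∀ (text : String), Dom_extract_lifecycle_values_py text → Spec_extract_lifecycle_values_py text (extract_lifecycle_values_py text)

-- ===== LEMMAS AND PROOFS =====

-- one step of B's fold in each parser state, spelled out
theorem pvStepB_two (acc : List String) (line : String) :
    pvStepB (2, acc) line = (2, acc) := rfl

theorem pvStepB_one (acc : List String) (line : String) :
    pvStepB (1, acc) line =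
      if PySem.Str.strip line = "" ∨ PySem.Str.startswith (PySem.Str.strip line) "Example:" = true
      then (2, acc)
      else if PySem.Str.startswith (PySem.Str.strip line) "-" = true then
        (1, acc ++ [pvDequoteB (PySem.Str.strip (pvLstripDashA (PySem.Str.strip line)))])
      else (1, acc) := rfl

theorem pvStepB_zero (acc : List String) (line : String) :
    pvStepB (0, acc) line = if line = "Canonical values:" then (1, acc) else (0, acc) := by
  by_cases h : line = "Canonical values:" <;> simp [pvStepB, h]

-- DONE state absorbs everything
theorem pvStepB_done (l : List String) (acc : List String) :
    l.foldl pvStepB (2, acc) = (2, acc) := by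
  induction l with
  | nil => rfl
  | cons x xs ih => rw [List.foldl_cons, pvStepB_two]; exact ih

-- COLLECT phase computes A's loop, appended to the accumulator
theorem pvStepB_collect (l : List String) (acc : List String) :
    (l.foldl pvStepB (1, acc)).2 = acc ++ pvLoopA l := by
  induction l generalizing acc with
  | nil => simp [pvLoopA]
  | cons line rest ih =>
    rw [List.foldl_cons, pvStepB_one]
    simp only [pvLoopA]
    by_cases h1 : PySem.Str.strip line = ""
    · rw [if_pos (Or.inl h1), if_pos h1, pvStepB_done]; simp
    · rw [if_neg h1]
      by_cases h2 : PySem.Str.startswith (PySem.Str.strip line) "Example:" = true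
      · rw [if_pos (Or.inr h2), if_pos h2, pvStepB_done]; simp
      · rw [if_neg (not_or.mpr ⟨h1, h2⟩), if_neg h2]
        by_cases h3 : PySem.Str.startswith (PySem.Str.strip line) "-" = true
        · rw [if_pos h3, if_neg (not_not_intro h3), ih]
          simp [pvDequoteB]
        · rw [if_neg h3, if_pos h3, ih]

-- SEEK phase: result is [] when the marker is absent, else the COLLECT fold over the tail
theorem pvStepB_seek (l : List String) :
    (l.foldl pvStepB (0, [])).2 =
      match PySem.List.index? l "Canonical values:" with
      | none => []
      | some k => ((l.drop (k + 1)).foldl pvStepB (1, [])).2 := by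
  induction l with
  | nil => rfl
  | cons line rest ih =>
    by_cases h : line = "Canonical values:"
    · subst h
      rw [PySem.List.index?_cons_self, List.foldl_cons, pvStepB_zero, if_pos rfl]
      rfl
    · rw [PySem.List.index?_cons_of_ne rest h, List.foldl_cons, pvStepB_zero, if_neg h, ih]
      cases PySem.List.index? rest "Canonical values:" with
      | none => rfl
      | some k => rfl

-- ===== VERDICT (by name: the statement is the Claim_ definition above) =====
theorem extract_lifecycle_values_py_spec : Claim_equal_extract_lifecycle_values_py := by
  intro text _
  unfold Spec_extract_lifecycle_values_py extract_lifecycle_values_py extract_lifecycle_values_py_alt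
  rw [pvStepB_seek]
  cases h : PySem.List.index? (PySem.Str.splitlines text) "Canonical values:" with
  | none => simp only [h]
  | some k => simp only [h, pvStepB_collect, List.nil_append]
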